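-- pv_equiv track=rewrite | github.com/MikeAlwaysCode/algorithm_py | Contests/LeetCodePython/Test.py | beautifulBouquet
-- ===== SOURCE A (Python) =====
-- from typing import List, Optional
--
-- def beautifulBouquet(flowers: List[int], cnt: int) -> int:
--     MOD = 10 ** 9 + 7
--     n = len(flowers)
--     chk = [0] * (10 ** 5 + 1)
--     preIdx = 0
--     ans = 0
--     for i in range(n):
--         chk[flowers[i]] += 1
--         if chk[flowers[i]] > cnt:
--             k = i - preIdx
--             ans += k * (k + 1) // 2
--
--             while chk[flowers[i]] > cnt:
--                 chk[flowers[preIdx]] -= 1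
--                 preIdx += 1
--
--             k = i - preIdx
--             ans -= k * (k + 1) // 2
--
--             ans %= MOD
--
--     k = n - preIdx
--     ans += k * (k + 1) // 2
--     ans %= MOD
--     return ans
-- ===== SOURCE B (Python) =====
-- def beautifulBouquet(flowers, cnt):
--     MOD = 10 ** 9 + 7
--     pos = [[] for _ in range(10 ** 5 + 1)]
--     bound = 0
--     ans = 0
--     for i, v in enumerate(flowers):
--         ps = pos[v]
--         ps.append(i)
--         if len(ps) > cnt:
--             b = ps[len(ps) - 1 - cnt] + 1
--             if b > bound:
--                 bound = b
--         ans = (ans + (i - bound + 1)) % MOD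
--     return ans
-- ===== Notes on version B (the rewrite author's own statement) =====
-- stated objective: alternative
-- what changed: B replaces A's count-array sliding window (inner while-loop shrinking the left pointer, triangular-number add/subtract bookkeeping) by per-flower occurrence-position lists: for each i it reads the (cnt+1)-th most recent occurrence of flowers[i] to update a monotone left bound directly and adds the window length (i - bound + 1) per endpoint, with no inner shrink loop.
import Mathlib
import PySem

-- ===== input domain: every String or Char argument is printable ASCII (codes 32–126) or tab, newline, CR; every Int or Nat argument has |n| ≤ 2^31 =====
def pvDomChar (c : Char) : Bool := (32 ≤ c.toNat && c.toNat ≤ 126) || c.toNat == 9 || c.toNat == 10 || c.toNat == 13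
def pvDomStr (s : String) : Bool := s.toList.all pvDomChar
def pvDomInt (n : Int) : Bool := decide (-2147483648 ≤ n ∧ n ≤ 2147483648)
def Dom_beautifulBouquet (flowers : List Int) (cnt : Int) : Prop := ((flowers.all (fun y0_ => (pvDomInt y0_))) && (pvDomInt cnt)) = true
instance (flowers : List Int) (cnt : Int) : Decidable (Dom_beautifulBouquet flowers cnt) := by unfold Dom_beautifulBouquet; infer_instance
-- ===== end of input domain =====

-- B replaces A's count-array sliding window (inner shrink loop + triangular bookkeeping) by
-- per-flower occurrence-position lists and a monotone left bound; same O(n), no inner loop.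

-- ===== PORT A =====
-- The Python list 'chk = [0]*(10**5+1)' is modelled by a total function (Int → Int);
-- pvNorm performs Python's negative-index wraparound for that list (exact for indices
-- -100001 ≤ v ≤ 100000, which Pre_ guarantees; outside, Python raises IndexError).
def pvNorm (v : Int) : Int := if v < 0 then v + 100001 else v

-- A's 'while chk[flowers[i]] > cnt: chk[flowers[preIdx]] -= 1; preIdx += 1';
-- fuel only makes it total (under Pre_ it never runs out)
def pvShrink (flowers : List Int) (cnt : Int) (t : Int) :
    Nat → (Int → Int) → Int → ((Int → Int) × Int)
  | 0, chk, pre => (chk, pre)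
  | fuel + 1, chk, pre =>
    if chk (pvNorm t) > cnt then
      let v := PySem.List.pyGetD flowers pre 0
      pvShrink flowers cnt t fuel
        (fun x => if x = pvNorm v then chk x - 1 else chk x) (pre + 1)
    else (chk, pre)

-- k*(k+1)//2
def pvTri (k : Int) : Int := PySem.Int.floordiv (k * (k + 1)) 2

def pvStepA (flowers : List Int) (cnt : Int)
    (st : (Int → Int) × Int × Int) (i : Int) : (Int → Int) × Int × Int :=
  let chk := st.1
  let pre := st.2.1
  let ans := st.2.2
  let t := PySem.List.pyGetD flowers i 0
  let chk1 := fun x => if x = pvNorm t then chk x + 1 else chk x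
  if chk1 (pvNorm t) > cnt then
    let ans1 := ans + pvTri (i - pre)
    let s2 := pvShrink flowers cnt t (flowers.length + 1) chk1 pre
    let ans2 := ans1 - pvTri (i - s2.2)
    (s2.1, s2.2, PySem.Int.mod ans2 (10 ^ 9 + 7))
  else (chk1, pre, ans)

def beautifulBouquet (flowers : List Int) (cnt : Int) : Int :=
  let n := flowers.length
  let s := (PySem.List.pyRange 0 (n : Int) 1).foldl (pvStepA flowers cnt)
    ((fun _ => 0), 0, 0)
  PySem.Int.mod (s.2.2 + pvTri ((n : Int) - s.2.1)) (10 ^ 9 + 7)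

-- ===== PORT B =====
-- The Python list-of-lists 'pos = [[] for _ in range(10**5+1)]' is modelled by a total
-- function (Int → List Int), indexed through the same pvNorm negative-index wraparound.
def pvStepB (flowers : List Int) (cnt : Int)
    (st : (Int → List Int) × Int × Int) (i : Int) : (Int → List Int) × Int × Int :=
  let pos := st.1
  let bound := st.2.1
  let ans := st.2.2
  let v := PySem.List.pyGetD flowers i 0
  let ps := pos (pvNorm v) ++ [i]
  let bound1 :=
    if (ps.length : Int) > cnt then
      let b := PySem.List.pyGetD ps ((ps.length : Int) - 1 - cnt) 0 + 1
      if b > bound then b else bound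
    else bound
  (fun x => if x = pvNorm v then ps else pos x, bound1,
   PySem.Int.mod (ans + (i - bound1 + 1)) (10 ^ 9 + 7))

def beautifulBouquet_alt (flowers : List Int) (cnt : Int) : Int :=
  ((PySem.List.pyRange 0 (flowers.length : Int) 1).foldl (pvStepB flowers cnt)
    ((fun _ => []), 0, 0)).2.2

-- ===== PRECONDITION & SPEC =====
-- Pre_ excludes exactly the inputs on which both Pythons raise IndexError: a flower value
-- outside the backing lists' index range [-100001, 100000], or a nonempty list with cnt < 0
-- (A's while loop then runs preIdx past the end of flowers; B indexes ps past its end).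
def Pre_beautifulBouquet (flowers : List Int) (cnt : Int) : Prop :=
  (flowers = [] ∨ 0 ≤ cnt) ∧ ∀ v ∈ flowers, -100001 ≤ v ∧ v ≤ 100000
instance (flowers : List Int) (cnt : Int) : Decidable (Pre_beautifulBouquet flowers cnt) := by
  unfold Pre_beautifulBouquet; infer_instance
def pvWitness_beautifulBouquet : List Int × Int := ([1, 2, 1, 3, 1], 1)

def Spec_beautifulBouquet (flowers : List Int) (cnt : Int) (out : Int) : Prop := out = beautifulBouquet_alt flowers cnt
instance (flowers : List Int) (cnt : Int) (out : Int) : Decidable (Spec_beautifulBouquet flowers cnt out) := by unfold Spec_beautifulBouquet; infer_instance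

-- ===== CLAIM (what is proved, stated in full; the proofs are below) =====
def Claim_equal_beautifulBouquet : Prop := ∀ (flowers : List Int) (cnt : Int), Dom_beautifulBouquet flowers cnt → Pre_beautifulBouquet flowers cnt → Spec_beautifulBouquet flowers cnt (beautifulBouquet flowers cnt)

-- ===== LEMMAS AND PROOFS =====

-- proof-side reference program: the plain per-endpoint sliding window (A's window, B's summation)
def pvRefStep (flowers : List Int) (cnt : Int)
    (st : (Int → Int) × Int × Int) (i : Int) : (Int → Int) × Int × Int :=
  let chk := st.1
  let left := st.2.1
  let ans := st.2.2
  let t := PySem.List.pyGetD flowers i 0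
  let chk1 := fun x => if x = pvNorm t then chk x + 1 else chk x
  let s2 := pvShrink flowers cnt t (flowers.length + 1) chk1 left
  (s2.1, s2.2, PySem.Int.mod (ans + (i - s2.2 + 1)) (10 ^ 9 + 7))

theorem pvTri_succ (k : Int) : pvTri (k + 1) = pvTri k + (k + 1) := by
  unfold pvTri
  rw [PySem.Int.floordiv_eq_ediv_of_pos (by norm_num),
      PySem.Int.floordiv_eq_ediv_of_pos (by norm_num)]
  obtain ⟨m, hm⟩ := Int.even_mul_succ_self k
  have h1 : k * (k + 1) = 2 * m := by linarith
  have h2 : (k + 1) * (k + 1 + 1) = 2 * (m + (k + 1)) := by linear_combination hm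
  rw [h1, h2, Int.mul_ediv_cancel_left _ (by norm_num), Int.mul_ediv_cancel_left _ (by norm_num)]

theorem pvMod_absorb (a b : Int) :
    PySem.Int.mod (PySem.Int.mod a (10 ^ 9 + 7) + b) (10 ^ 9 + 7) =
    PySem.Int.mod (a + b) (10 ^ 9 + 7) := by
  rw [PySem.Int.mod_eq_emod_of_pos (by norm_num),
      PySem.Int.mod_eq_emod_of_pos (by norm_num),
      PySem.Int.mod_eq_emod_of_pos (by norm_num)]
  exact Int.emod_add_emod a (10 ^ 9 + 7) b

theorem pvShrink_noop (flowers : List Int) (cnt t : Int) (fuel : Nat)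
    (chk : Int → Int) (pre : Int) (h : ¬ chk (pvNorm t) > cnt) :
    pvShrink flowers cnt t fuel chk pre = (chk, pre) := by
  cases fuel with
  | zero => rfl
  | succ f => simp [pvShrink, h]

-- A's fold versus the reference fold: same chk and left pointer, and A's triangular
-- bookkeeping telescopes to the reference's per-endpoint sum.
theorem pvInvA (flowers : List Int) (cnt : Int) (m : Nat) :
    (((PySem.List.pyRange 0 (m : Int) 1).foldl (pvStepA flowers cnt) ((fun _ => 0), 0, 0)).1 =
      ((PySem.List.pyRange 0 (m : Int) 1).foldl (pvRefStep flowers cnt) ((fun _ => 0), 0, 0)).1) ∧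
    (((PySem.List.pyRange 0 (m : Int) 1).foldl (pvStepA flowers cnt) ((fun _ => 0), 0, 0)).2.1 =
      ((PySem.List.pyRange 0 (m : Int) 1).foldl (pvRefStep flowers cnt) ((fun _ => 0), 0, 0)).2.1) ∧
    (PySem.Int.mod
      (((PySem.List.pyRange 0 (m : Int) 1).foldl (pvStepA flowers cnt) ((fun _ => 0), 0, 0)).2.2 +
        pvTri ((m : Int) -
          ((PySem.List.pyRange 0 (m : Int) 1).foldl (pvStepA flowers cnt) ((fun _ => 0), 0, 0)).2.1))
      (10 ^ 9 + 7) =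
      ((PySem.List.pyRange 0 (m : Int) 1).foldl (pvRefStep flowers cnt) ((fun _ => 0), 0, 0)).2.2) := by
  induction m with
  | zero =>
    rw [PySem.List.pyRange_one_eq_nil (by norm_num)]
    refine ⟨rfl, rfl, ?_⟩
    simp only [List.foldl_nil]
    norm_num [pvTri, PySem.Int.floordiv_eq_ediv_of_pos (show (0:Int) < 2 by norm_num),
      PySem.Int.mod_eq_emod_of_pos (show (0:Int) < 10 ^ 9 + 7 by norm_num)]
  | succ m ih =>
    have hcast : ((m + 1 : Nat) : Int) = (m : Int) + 1 := by push_cast; ring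
    rw [hcast, PySem.List.pyRange_one_succ_right (by positivity), List.foldl_append,
        List.foldl_append]
    set sA := (PySem.List.pyRange 0 (m : Int) 1).foldl (pvStepA flowers cnt) ((fun _ => 0), 0, 0) with hsA
    set sB := (PySem.List.pyRange 0 (m : Int) 1).foldl (pvRefStep flowers cnt) ((fun _ => 0), 0, 0) with hsB
    obtain ⟨h1, h2, h3⟩ := ih
    simp only [List.foldl_cons, List.foldl_nil, pvStepA, pvRefStep, ← h1, ← h2]
    set t := PySem.List.pyGetD flowers (m : Int) 0 with ht
    by_cases hc : sA.1 (pvNorm t) + 1 > cnt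
    · simp only [hc, if_true]
      refine ⟨trivial, trivial, ?_⟩
      generalize (pvShrink flowers cnt t (flowers.length + 1)
        (fun x => if x = pvNorm t then sA.1 x + 1 else sA.1 x) sA.2.1).2 = L
      rw [← h3, pvMod_absorb, pvMod_absorb]
      congr 1
      have e : (m : Int) + 1 - L = ((m : Int) - L) + 1 := by ring
      rw [e, pvTri_succ]
      ring
    · have hc' : ¬ ((fun x => if x = pvNorm t then sA.1 x + 1 else sA.1 x) (pvNorm t) > cnt) := by
        simpa using hc
      rw [if_neg (by simpa using hc), pvShrink_noop flowers cnt t _ _ _ hc']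
      refine ⟨rfl, rfl, ?_⟩
      rw [← h3, pvMod_absorb]
      congr 1
      have e : (m : Int) + 1 - sA.2.1 = ((m : Int) - sA.2.1) + 1 := by ring
      rw [e, pvTri_succ]
      ring

-- occurrence positions of (wrapped) flower type x among the first m indices
def pvOcc (flowers : List Int) (m : Nat) (x : Int) : List Int :=
  ((List.range m).filter
    (fun (j : Nat) => pvNorm (PySem.List.pyGetD flowers ((j : Nat) : Int) 0) == x)).map
    (fun (j : Nat) => ((j : Nat) : Int))

-- number of elements ≥ q
def pvCntGe (q : Int) (S : List Int) : Nat := S.countP (fun j => decide (q ≤ j))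

theorem pvOcc_succ (flowers : List Int) (m : Nat) (x : Int) :
    pvOcc flowers (m + 1) x =
      pvOcc flowers m x ++
        (if pvNorm (PySem.List.pyGetD flowers (m : Int) 0) = x then [(m : Int)] else []) := by
  unfold pvOcc
  rw [List.range_succ, List.filter_append, List.map_append]
  congr 1
  by_cases h : pvNorm (PySem.List.pyGetD flowers (m : Int) 0) = x <;>
    · simp only [PySem.List.pyGetD_natCast, List.getD_eq_getElem?_getD] at h
      simp [h]

theorem pvOcc_bounds (flowers : List Int) (m : Nat) (x : Int) :
    ∀ j ∈ pvOcc flowers m x, 0 ≤ j ∧ j < (m : Int) := by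
  intro j hj
  unfold pvOcc at hj
  simp only [List.mem_map, List.mem_filter, List.mem_range] at hj
  obtain ⟨k, ⟨hk, _⟩, rfl⟩ := hj
  constructor <;> omega

theorem pvOcc_pairwise (flowers : List Int) (m : Nat) (x : Int) :
    (pvOcc flowers m x).Pairwise (· < ·) := by
  unfold pvOcc
  rw [List.pairwise_map]
  exact (List.pairwise_lt_range.filter _).imp (by intro a b h; exact_mod_cast h)

theorem pvOcc_count (flowers : List Int) (m : Nat) (p : Int) {x : Int}
    (h0 : 0 ≤ p) (hm : p < (m : Int)) :
    (pvOcc flowers m x).count p =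
      if pvNorm (PySem.List.pyGetD flowers p 0) = x then 1 else 0 := by
  have hnd : (pvOcc flowers m x).Nodup := (pvOcc_pairwise flowers m x).imp ne_of_lt
  have hmem : p ∈ pvOcc flowers m x ↔ pvNorm (PySem.List.pyGetD flowers p 0) = x := by
    unfold pvOcc
    simp only [List.mem_map, List.mem_filter, List.mem_range, beq_iff_eq]
    constructor
    · rintro ⟨k, ⟨hk, hpred⟩, rfl⟩
      exact hpred
    · intro h
      refine ⟨p.toNat, ⟨by omega, ?_⟩, by omega⟩
      rwa [Int.toNat_of_nonneg h0]
  by_cases h : pvNorm (PySem.List.pyGetD flowers p 0) = x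
  · rw [if_pos h]
    exact List.count_eq_one_of_mem hnd (hmem.2 h)
  · rw [if_neg h]
    exact List.count_eq_zero_of_not_mem (fun hc => h (hmem.1 hc))

theorem pvCntGe_succ (p : Int) (l : List Int) :
    pvCntGe p l = pvCntGe (p + 1) l + l.count p := by
  induction l with
  | nil => rfl
  | cons a tl ih =>
    simp only [pvCntGe, List.countP_cons, List.count_cons, beq_iff_eq,
      decide_eq_true_eq] at *
    split_ifs <;> omega

theorem pvCntGe_zero_of_ge (flowers : List Int) (m : Nat) (x q : Int)
    (h : (m : Int) ≤ q) : pvCntGe q (pvOcc flowers m x) = 0 := by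
  unfold pvCntGe
  rw [List.countP_eq_zero]
  intro j hj
  have := pvOcc_bounds flowers m x j hj
  simp only [decide_eq_true_eq]
  omega

theorem pvCntGe_ge_of_le_getElem (S : List Int) (hS : S.Pairwise (· < ·)) (q : Int)
    {i : Nat} (hi : i < S.length) (hq : q ≤ S[i]) :
    S.length - i ≤ pvCntGe q S := by
  have hmono := List.pairwise_iff_getElem.mp hS
  have hdrop : (S.drop i).countP (fun j => decide (q ≤ j)) = (S.drop i).length := by
    rw [List.countP_eq_length]
    intro a ha
    rw [List.mem_iff_getElem] at ha
    obtain ⟨k, hk, hak⟩ := ha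
    have hlen : i + k < S.length := by
      rw [List.length_drop] at hk; omega
    have hak' : a = S[i + k] := by rw [← hak]; simp [List.getElem_drop]
    have hSi : S[i] ≤ S[i + k] := by
      rcases Nat.eq_zero_or_pos k with rfl | hkpos
      · simp
      · exact le_of_lt (hmono i (i + k) (by omega) hlen (by omega))
    subst hak'
    simp only [decide_eq_true_eq]
    exact le_trans hq hSi
  have hsplit : pvCntGe q S =
      (S.take i).countP (fun j => decide (q ≤ j)) + (S.drop i).countP (fun j => decide (q ≤ j)) := by
    unfold pvCntGe
    conv_lhs => rw [← List.take_append_drop i S]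
    rw [List.countP_append]
  rw [hsplit, hdrop, List.length_drop]
  omega

theorem pvCntGe_le_of_getElem_lt (S : List Int) (hS : S.Pairwise (· < ·)) (q : Int)
    {i : Nat} (hi : i < S.length) (hq : S[i] < q) :
    pvCntGe q S ≤ S.length - (i + 1) := by
  have hmono := List.pairwise_iff_getElem.mp hS
  have htake : (S.take (i + 1)).countP (fun j => decide (q ≤ j)) = 0 := by
    rw [List.countP_eq_zero]
    intro a ha
    rw [List.mem_iff_getElem] at ha
    obtain ⟨k, hk, hak⟩ := ha
    rw [List.length_take] at hk
    have hklen : k < S.length := by omega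
    have hak' : a = S[k] := by rw [← hak]; simp [List.getElem_take]
    have hle : S[k] ≤ S[i] := by
      rcases Nat.lt_or_ge k i with hki | hki
      · exact le_of_lt (hmono k i (by omega) hi hki)
      · have hke : k = i := by omega
        subst hke; exact le_refl _
    subst hak'
    simp only [decide_eq_true_eq]
    omega
  have hsplit : pvCntGe q S =
      (S.take (i + 1)).countP (fun j => decide (q ≤ j)) +
        (S.drop (i + 1)).countP (fun j => decide (q ≤ j)) := by
    unfold pvCntGe
    conv_lhs => rw [← List.take_append_drop (i + 1) S]
    rw [List.countP_append]
  have hd := List.countP_le_length (p := fun j => decide (q ≤ j)) (l := S.drop (i + 1))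
  rw [List.length_drop] at hd
  omega

-- full specification of A's shrink loop against the occurrence lists
theorem pvShrink_spec (flowers : List Int) (cnt t : Int) (M : Nat) (hcnt : 0 ≤ cnt) :
    ∀ (fuel : Nat) (p : Int) (chk : Int → Int),
    (∀ x, chk x = (pvCntGe p (pvOcc flowers M x) : Int)) →
    0 ≤ p → p ≤ (M : Int) → (M : Int) - p < (fuel : Int) →
    (∀ x, (pvShrink flowers cnt t fuel chk p).1 x =
        (pvCntGe (pvShrink flowers cnt t fuel chk p).2 (pvOcc flowers M x) : Int)) ∧
    p ≤ (pvShrink flowers cnt t fuel chk p).2 ∧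
    (pvShrink flowers cnt t fuel chk p).2 ≤ (M : Int) ∧
    ((pvCntGe (pvShrink flowers cnt t fuel chk p).2 (pvOcc flowers M (pvNorm t)) : Int) ≤ cnt) ∧
    (∀ q, p ≤ q → q < (pvShrink flowers cnt t fuel chk p).2 →
        cnt < (pvCntGe q (pvOcc flowers M (pvNorm t)) : Int)) := by
  intro fuel
  induction fuel with
  | zero =>
    intro p chk _ _ hM hfuel
    exfalso
    omega
  | succ f ih =>
    intro p chk hinv h0 hM hfuel
    by_cases hc : chk (pvNorm t) > cnt
    · have hpM : p < (M : Int) := by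
        by_contra hge
        have hz := pvCntGe_zero_of_ge flowers M (pvNorm t) p (by omega)
        rw [hinv (pvNorm t), hz] at hc
        simp at hc
        omega
      have hstep : pvShrink flowers cnt t (f + 1) chk p =
          pvShrink flowers cnt t f
            (fun x => if x = pvNorm (PySem.List.pyGetD flowers p 0) then chk x - 1 else chk x)
            (p + 1) := by
        simp [pvShrink, hc]
      rw [hstep]
      have hinv' : ∀ x,
          (if x = pvNorm (PySem.List.pyGetD flowers p 0) then chk x - 1 else chk x) =
            (pvCntGe (p + 1) (pvOcc flowers M x) : Int) := by
        intro x
        have h1 := hinv x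
        rw [pvCntGe_succ p (pvOcc flowers M x), pvOcc_count flowers M p h0 hpM] at h1
        by_cases hx : x = pvNorm (PySem.List.pyGetD flowers p 0)
        · rw [if_pos hx]
          rw [if_pos hx.symm] at h1
          push_cast at h1 ⊢
          omega
        · rw [if_neg hx]
          rw [if_neg (fun hh => hx hh.symm)] at h1
          push_cast at h1 ⊢
          omega
      obtain ⟨i1, i2, i3, i4, i5⟩ :=
        ih (p + 1)
          (fun x => if x = pvNorm (PySem.List.pyGetD flowers p 0) then chk x - 1 else chk x)
          hinv' (by omega) (by omega) (by push_cast at hfuel ⊢; omega)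
      refine ⟨i1, by omega, i3, i4, ?_⟩
      intro q hq1 hq2
      rcases eq_or_lt_of_le hq1 with rfl | hq
      · rw [hinv (pvNorm t)] at hc
        exact hc
      · exact i5 q (by omega) hq2
    · have hstep : pvShrink flowers cnt t (f + 1) chk p = (chk, p) := by
        simp [pvShrink, hc]
      rw [hstep]
      refine ⟨hinv, le_refl p, hM, ?_, ?_⟩
      · rw [← hinv (pvNorm t)]
        omega
      · intro q hq1 hq2
        exfalso
        omega

-- B's bound update computes exactly the shrink loop's final left pointer
theorem pvBound_eq (S : List Int) (hS : S.Pairwise (· < ·)) (cnt pre p' : Int)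
    (hcnt : 0 ≤ cnt) (hpre : pre ≤ p')
    (h4 : (pvCntGe p' S : Int) ≤ cnt)
    (h5 : ∀ q, pre ≤ q → q < p' → cnt < (pvCntGe q S : Int)) :
    (if ((S.length : Nat) : Int) > cnt then
       (if PySem.List.pyGetD S (((S.length : Nat) : Int) - 1 - cnt) 0 + 1 > pre then
          PySem.List.pyGetD S (((S.length : Nat) : Int) - 1 - cnt) 0 + 1
        else pre)
     else pre) = p' := by
  by_cases hlen : ((S.length : Nat) : Int) > cnt
  · rw [if_pos hlen]
    have hc : cnt = (cnt.toNat : Int) := (Int.toNat_of_nonneg hcnt).symm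
    have hlen' : cnt.toNat < S.length := by omega
    have hi0lt : S.length - 1 - cnt.toNat < S.length := by omega
    have hidx : PySem.List.pyGetD S (((S.length : Nat) : Int) - 1 - cnt) 0 =
        S[S.length - 1 - cnt.toNat] := by
      have he : ((S.length : Nat) : Int) - 1 - cnt = ((S.length - 1 - cnt.toNat : Nat) : Int) := by
        omega
      rw [he, PySem.List.pyGetD_natCast, List.getD_eq_getElem?_getD,
          List.getElem?_eq_getElem hi0lt, Option.getD_some]
    have hlt : S[S.length - 1 - cnt.toNat] < p' := by
      by_contra hle
      have hge := pvCntGe_ge_of_le_getElem S hS p' hi0lt (by omega)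
      omega
    by_cases hcase : p' = pre
    · rw [hidx, if_neg (by omega)]
      omega
    · have hplt : pre < p' := lt_of_le_of_ne hpre (fun hh => hcase hh.symm)
      have h5' := h5 (p' - 1) (by omega) (by omega)
      have hge : p' - 1 ≤ S[S.length - 1 - cnt.toNat] := by
        by_contra hgt
        have hle2 := pvCntGe_le_of_getElem_lt S hS (p' - 1) hi0lt (by omega)
        omega
      rw [hidx, if_pos (by omega)]
      omega
  · rw [if_neg hlen]
    have hle : (pvCntGe pre S : Int) ≤ cnt := by
      have hlp := List.countP_le_length (p := fun j => decide (pre ≤ j)) (l := S)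
      unfold pvCntGe
      omega
    by_contra hne
    have hplt : pre < p' := lt_of_le_of_ne hpre hne
    exact absurd (h5 pre (le_refl pre) hplt) (by omega)

-- the reference fold versus B's fold
theorem pvInvB (flowers : List Int) (cnt : Int) (hcnt : 0 ≤ cnt) (m : Nat)
    (hm : m ≤ flowers.length) :
    (∀ x, ((PySem.List.pyRange 0 (m : Int) 1).foldl (pvRefStep flowers cnt) ((fun _ => 0), 0, 0)).1 x =
      (pvCntGe ((PySem.List.pyRange 0 (m : Int) 1).foldl (pvRefStep flowers cnt) ((fun _ => 0), 0, 0)).2.1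
        (pvOcc flowers m x) : Int)) ∧
    (∀ x, ((PySem.List.pyRange 0 (m : Int) 1).foldl (pvStepB flowers cnt) ((fun _ => []), 0, 0)).1 x =
      pvOcc flowers m x) ∧
    ((PySem.List.pyRange 0 (m : Int) 1).foldl (pvRefStep flowers cnt) ((fun _ => 0), 0, 0)).2.1 =
      ((PySem.List.pyRange 0 (m : Int) 1).foldl (pvStepB flowers cnt) ((fun _ => []), 0, 0)).2.1 ∧
    0 ≤ ((PySem.List.pyRange 0 (m : Int) 1).foldl (pvRefStep flowers cnt) ((fun _ => 0), 0, 0)).2.1 ∧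
    ((PySem.List.pyRange 0 (m : Int) 1).foldl (pvRefStep flowers cnt) ((fun _ => 0), 0, 0)).2.1 ≤ (m : Int) ∧
    ((PySem.List.pyRange 0 (m : Int) 1).foldl (pvRefStep flowers cnt) ((fun _ => 0), 0, 0)).2.2 =
      ((PySem.List.pyRange 0 (m : Int) 1).foldl (pvStepB flowers cnt) ((fun _ => []), 0, 0)).2.2 := by
  revert hm
  induction m with
  | zero =>
    intro _
    rw [show ((0 : Nat) : Int) = 0 by norm_num, PySem.List.pyRange_one_eq_nil le_rfl]
    simp [pvCntGe, pvOcc]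
  | succ m ih =>
    intro hm
    obtain ⟨ihR, ihB, ihpre, ihpre0, ihprem, ihans⟩ := ih (by omega)
    have hcast : ((m + 1 : Nat) : Int) = (m : Int) + 1 := by push_cast; ring
    rw [hcast, PySem.List.pyRange_one_succ_right (by positivity), List.foldl_append,
        List.foldl_append]
    set sR := (PySem.List.pyRange 0 (m : Int) 1).foldl (pvRefStep flowers cnt) ((fun _ => 0), 0, 0) with hsR
    set sB := (PySem.List.pyRange 0 (m : Int) 1).foldl (pvStepB flowers cnt) ((fun _ => []), 0, 0) with hsB
    simp only [List.foldl_cons, List.foldl_nil, pvRefStep, pvStepB]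
    set t := PySem.List.pyGetD flowers (m : Int) 0 with ht
    -- positions list for the current flower, after appending index m
    have hps : sB.1 (pvNorm t) ++ [(m : Int)] = pvOcc flowers (m + 1) (pvNorm t) := by
      rw [ihB, pvOcc_succ, ← ht, if_pos rfl]
    -- the incremented count function matches the occurrence lists over the longer prefix
    have hocc1 : ∀ x, (if x = pvNorm t then sR.1 x + 1 else sR.1 x) =
        (pvCntGe sR.2.1 (pvOcc flowers (m + 1) x) : Int) := by
      intro x
      rw [pvOcc_succ, ← ht]
      by_cases hx : x = pvNorm t
      · rw [if_pos hx, if_pos hx.symm]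
        unfold pvCntGe
        rw [List.countP_append]
        have hone : List.countP (fun j => decide (sR.2.1 ≤ j)) [(m : Int)] = 1 := by
          simp only [List.countP_cons, List.countP_nil]
          have hlem : sR.2.1 ≤ (m : Int) := ihprem
          simp [hlem]
        rw [hone, ihR x]
        unfold pvCntGe
        push_cast
        ring
      · rw [if_neg hx, if_neg (fun hh => hx hh.symm), List.append_nil]
        exact ihR x
    obtain ⟨j1, j2, j3, j4, j5⟩ :=
      pvShrink_spec flowers cnt t (m + 1) hcnt (flowers.length + 1) sR.2.1
        (fun x => if x = pvNorm t then sR.1 x + 1 else sR.1 x) hocc1 ihpre0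
        (by push_cast; omega) (by push_cast; omega)
    set s2 := pvShrink flowers cnt t (flowers.length + 1)
      (fun x => if x = pvNorm t then sR.1 x + 1 else sR.1 x) sR.2.1 with hs2
    -- B's bound update equals the shrink loop's final pointer
    have hbound :
        (if ((sB.1 (pvNorm t) ++ [(m : Int)]).length : Int) > cnt then
           (if PySem.List.pyGetD (sB.1 (pvNorm t) ++ [(m : Int)])
                (((sB.1 (pvNorm t) ++ [(m : Int)]).length : Int) - 1 - cnt) 0 + 1 > sB.2.1 then
              PySem.List.pyGetD (sB.1 (pvNorm t) ++ [(m : Int)])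
                (((sB.1 (pvNorm t) ++ [(m : Int)]).length : Int) - 1 - cnt) 0 + 1
            else sB.2.1)
         else sB.2.1) = s2.2 := by
      rw [hps, ← ihpre]
      exact pvBound_eq (pvOcc flowers (m + 1) (pvNorm t))
        (pvOcc_pairwise flowers (m + 1) (pvNorm t)) cnt sR.2.1 s2.2 hcnt j2 j4 j5
    refine ⟨j1, ?_, hbound.symm, by omega, by omega, ?_⟩
    · intro x
      by_cases hx : x = pvNorm t
      · rw [if_pos hx, hx]
        exact hps
      · rw [if_neg hx, ihB, pvOcc_succ, ← ht, if_neg (fun hh => hx hh.symm), List.append_nil]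
    · rw [hbound, ihans]

theorem pvEmpty (cnt : Int) : beautifulBouquet [] cnt = beautifulBouquet_alt [] cnt := by
  unfold beautifulBouquet beautifulBouquet_alt
  rw [show (([] : List Int).length : Int) = 0 by simp, PySem.List.pyRange_one_eq_nil (by norm_num)]
  simp only [List.foldl_nil]
  norm_num [pvTri, PySem.Int.floordiv_eq_ediv_of_pos (show (0:Int) < 2 by norm_num),
    PySem.Int.mod_eq_emod_of_pos (show (0:Int) < 10 ^ 9 + 7 by norm_num)]

-- ===== VERDICT (by name: the statement is the Claim_ definition above) =====
theorem beautifulBouquet_spec : Claim_equal_beautifulBouquet := by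
  intro flowers cnt _ hpre
  unfold Spec_beautifulBouquet
  rcases hpre.1 with hnil | hcnt
  · subst hnil; exact pvEmpty cnt
  · unfold beautifulBouquet beautifulBouquet_alt
    exact ((pvInvA flowers cnt flowers.length).2.2).trans
      ((pvInvB flowers cnt hcnt flowers.length le_rfl).2.2.2.2.2)
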